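-- pv_equiv track=rewrite | github.com/xyttyxy/ale_scripts | jobs/autoads.py | mask_on_mask
-- ===== SOURCE A (Python) =====
-- def mask_on_mask(old_mask, lst):
--     i = 0
--     mask = []
--     for idx, elm in enumerate(old_mask):
--         if elm == True:
--             if i not in lst:
--                 mask.append(False)
--             else:
--                 mask.append(True)
--             i += 1
--         else:
--             mask.append(False)
--     return mask
-- ===== SOURCE B (Python) =====
-- def mask_on_mask(old_mask, lst):
--     true_positions = [pos for pos, elm in enumerate(old_mask) if elm == True]
--     mask = [False] * len(old_mask)
--     for j, pos in enumerate(true_positions):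
--         mask[pos] = j in lst
--     return mask
-- ===== Notes on version B (the rewrite author's own statement) =====
-- stated objective: alternative
-- what changed: Replaces A's single pass that threads a running True-counter and appends to the output with a two-pass decomposition: first materialize the positions of True elements, then fill a preallocated [False]*n mask by assigning mask[pos] = j in lst for the j-th True position.
import Mathlib
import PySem

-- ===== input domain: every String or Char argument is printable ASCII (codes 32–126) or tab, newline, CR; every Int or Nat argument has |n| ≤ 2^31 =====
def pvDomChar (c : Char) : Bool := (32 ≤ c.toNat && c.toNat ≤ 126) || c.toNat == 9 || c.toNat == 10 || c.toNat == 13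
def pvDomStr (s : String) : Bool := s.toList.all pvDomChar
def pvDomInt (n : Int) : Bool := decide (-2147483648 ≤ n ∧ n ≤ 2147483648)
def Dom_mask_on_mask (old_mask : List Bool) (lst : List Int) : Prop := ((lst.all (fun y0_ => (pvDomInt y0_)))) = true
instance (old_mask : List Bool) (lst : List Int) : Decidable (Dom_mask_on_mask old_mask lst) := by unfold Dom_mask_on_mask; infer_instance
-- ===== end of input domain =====

-- B replaces A's one pass with a running True-counter by two passes (collect True positions,
-- then assign into a preallocated all-False mask); alternative decomposition, same cost.

-- ===== PORT A =====
-- literal port of A: one fold over enumerate(old_mask), threading (i, mask)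
def mask_on_mask (old_mask : List Bool) (lst : List Int) : List Bool :=
  (((PySem.List.enumerate old_mask 0).foldl
      (fun (st : Int × List Bool) ie =>
        if ie.2 == true then
          (if ¬ (st.1 ∈ lst) then (st.1 + 1, st.2 ++ [false])
           else (st.1 + 1, st.2 ++ [true]))
        else (st.1, st.2 ++ [false]))
      ((0 : Int), ([] : List Bool)))).2

-- ===== PORT B =====
-- literal port of B: true_positions pass, then assignment pass over a replicate-False mask.
-- mask[pos] = v is pySetD (pos is always a valid index here, so Python never raises).
def mask_on_mask_alt (old_mask : List Bool) (lst : List Int) : List Bool :=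
  let true_positions :=
    ((PySem.List.enumerate old_mask 0).filter (fun pe => pe.2 == true)).map (fun pe => pe.1)
  let mask := List.replicate old_mask.length false
  (PySem.List.enumerate true_positions 0).foldl
    (fun m jp => PySem.List.pySetD m jp.2 (decide (jp.1 ∈ lst))) mask

-- ===== PRECONDITION & SPEC =====
def Spec_mask_on_mask (old_mask : List Bool) (lst : List Int) (out : List Bool) : Prop := out = mask_on_mask_alt old_mask lst
instance (old_mask : List Bool) (lst : List Int) (out : List Bool) : Decidable (Spec_mask_on_mask old_mask lst out) := by unfold Spec_mask_on_mask; infer_instance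

-- ===== CLAIM (what is proved, stated in full; the proofs are below) =====
def Claim_equal_mask_on_mask : Prop := ∀ (old_mask : List Bool) (lst : List Int), Dom_mask_on_mask old_mask lst → Spec_mask_on_mask old_mask lst (mask_on_mask old_mask lst)

-- ===== LEMMAS AND PROOFS =====

-- common characterisation: the j-th True element (counting from i) maps to (i + j ∈ lst), False stays False
def pvCore (lst : List Int) : List Bool → Int → List Bool
  | [], _ => []
  | b :: t, i =>
    if b then decide (i ∈ lst) :: pvCore lst t (i + 1) else false :: pvCore lst t i

-- A side: one step of A's fold
theorem pvA_step (lst : List Int) (i : Int) (acc : List Bool) (b : Bool) :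
    (if b == true then
       (if ¬ (i ∈ lst) then (i + 1, acc ++ [false]) else (i + 1, acc ++ [true]))
     else (i, acc ++ [false]))
    = if b then (i + 1, acc ++ [decide (i ∈ lst)]) else (i, acc ++ [false]) := by
  cases b with
  | false => rfl
  | true => by_cases h : i ∈ lst <;> simp [h]

theorem pvA_fold (lst : List Int) (t : List Bool) (s i : Int) (acc : List Bool) :
    (((PySem.List.enumerate t s).foldl
      (fun (st : Int × List Bool) ie =>
        if ie.2 == true then
          (if ¬ (st.1 ∈ lst) then (st.1 + 1, st.2 ++ [false])
           else (st.1 + 1, st.2 ++ [true]))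
        else (st.1, st.2 ++ [false]))
      (i, acc))).2 = acc ++ pvCore lst t i := by
  induction t generalizing s i acc with
  | nil => simp [PySem.List.enumerate_nil, pvCore]
  | cons b t ih =>
    rw [PySem.List.enumerate_cons, List.foldl_cons]
    dsimp only
    rw [pvA_step]
    cases b with
    | false =>
      rw [if_neg (by simp), ih (s + 1) i (acc ++ [false])]
      simp [pvCore]
    | true =>
      rw [if_pos rfl, ih (s + 1) (i + 1) (acc ++ [decide (i ∈ lst)])]
      simp [pvCore]

-- enumerate start-shift
theorem pvEnum_shift (t : List Bool) (s : Int) :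
    PySem.List.enumerate t (s + 1)
      = (PySem.List.enumerate t s).map (fun p => (p.1 + 1, p.2)) := by
  induction t generalizing s with
  | nil => simp [PySem.List.enumerate_nil]
  | cons b t ih =>
    rw [PySem.List.enumerate_cons, PySem.List.enumerate_cons, List.map_cons, ih]

def pvTp (t : List Bool) (s : Int) : List Int :=
  ((PySem.List.enumerate t s).filter (fun pe => pe.2 == true)).map (fun pe => pe.1)

theorem pvTp_shift (t : List Bool) (s : Int) :
    pvTp t (s + 1) = (pvTp t s).map (fun p => p + 1) := by
  unfold pvTp
  rw [pvEnum_shift, List.filter_map, List.map_map, List.map_map]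
  rfl

theorem pvTp_cons_false (t : List Bool) (s : Int) :
    pvTp (false :: t) s = (pvTp t s).map (fun p => p + 1) := by
  rw [← pvTp_shift]
  unfold pvTp
  rw [PySem.List.enumerate_cons]
  simp

theorem pvTp_cons_true (t : List Bool) (s : Int) :
    pvTp (true :: t) s = s :: (pvTp t s).map (fun p => p + 1) := by
  rw [← pvTp_shift]
  unfold pvTp
  rw [PySem.List.enumerate_cons]
  simp

theorem pvTp_nonneg (t : List Bool) (p : Int) (hp : p ∈ pvTp t 0) : 0 ≤ p := by
  unfold pvTp at hp
  simp only [List.mem_map, List.mem_filter] at hp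
  obtain ⟨pe, ⟨hmem, _⟩, rfl⟩ := hp
  rw [PySem.List.mem_enumerate_iff] at hmem
  obtain ⟨k, hk, rfl⟩ := hmem
  simp

def pvBGo (lst : List Int) (ps : List Int) (j : Int) (m : List Bool) : List Bool :=
  (PySem.List.enumerate ps j).foldl
    (fun m jp => PySem.List.pySetD m jp.2 (decide (jp.1 ∈ lst))) m

theorem pvBGo_shift (lst : List Int) (ps : List Int) (j : Int) (x : Bool) (m : List Bool)
    (hps : ∀ p ∈ ps, 0 ≤ p) :
    pvBGo lst (ps.map (fun p => p + 1)) j (x :: m) = x :: pvBGo lst ps j m := by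
  induction ps generalizing j x m with
  | nil => simp [pvBGo, PySem.List.enumerate_nil]
  | cons p ps ih =>
    have hp : 0 ≤ p := hps p (by simp)
    unfold pvBGo
    rw [List.map_cons, PySem.List.enumerate_cons, PySem.List.enumerate_cons,
        List.foldl_cons, List.foldl_cons]
    have hset : PySem.List.pySetD (x :: m) (p + 1) (decide (j ∈ lst))
        = x :: PySem.List.pySetD m p (decide (j ∈ lst)) := by
      rw [PySem.List.pySetD_of_nonneg _ _ (by omega),
          PySem.List.pySetD_of_nonneg _ _ hp]
      have h1 : (p + 1).toNat = p.toNat + 1 := by omega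
      rw [h1, List.set_cons_succ]
    rw [hset]
    exact ih (j + 1) x (PySem.List.pySetD m p (decide (j ∈ lst)))
      (fun q hq => hps q (List.mem_cons_of_mem _ hq))

theorem pvB_core (lst : List Int) (t : List Bool) (j : Int) :
    pvBGo lst (pvTp t 0) j (List.replicate t.length false) = pvCore lst t j := by
  induction t generalizing j with
  | nil => simp [pvBGo, pvTp, PySem.List.enumerate_nil, pvCore]
  | cons b t ih =>
    rw [List.length_cons, List.replicate_succ]
    cases b with
    | false =>
      rw [pvTp_cons_false, pvBGo_shift lst _ j false _ (pvTp_nonneg t), ih]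
      simp [pvCore]
    | true =>
      rw [pvTp_cons_true]
      unfold pvBGo
      rw [PySem.List.enumerate_cons, List.foldl_cons]
      have hset : PySem.List.pySetD (false :: List.replicate t.length false) (0 : Int)
          (decide (j ∈ lst)) = decide (j ∈ lst) :: List.replicate t.length false := by
        rw [PySem.List.pySetD_of_nonneg _ _ (by omega)]
        rfl
      rw [hset]
      have hsh := pvBGo_shift lst (pvTp t 0) (j + 1) (decide (j ∈ lst))
        (List.replicate t.length false) (pvTp_nonneg t)
      unfold pvBGo at hsh
      rw [hsh]
      have hih := ih (j + 1)
      unfold pvBGo at hih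
      rw [hih]
      simp [pvCore]

theorem pvA_eq_core (old_mask : List Bool) (lst : List Int) :
    mask_on_mask old_mask lst = pvCore lst old_mask 0 := by
  unfold mask_on_mask
  rw [pvA_fold lst old_mask 0 0 []]
  simp

theorem pvB_eq_core (old_mask : List Bool) (lst : List Int) :
    mask_on_mask_alt old_mask lst = pvCore lst old_mask 0 := by
  unfold mask_on_mask_alt
  exact pvB_core lst old_mask 0

-- ===== VERDICT (by name: the statement is the Claim_ definition above) =====
theorem mask_on_mask_spec : Claim_equal_mask_on_mask := by
  intro old_mask lst _
  unfold Spec_mask_on_mask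
  rw [pvA_eq_core, pvB_eq_core]
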